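-- pv_equiv track=rewrite | github.com/WuZheng0216/wargame2025 | reflection_agent.py | _format_score_breakdown
-- ===== SOURCE A (Python) =====
-- from typing import Dict, List, Optional, Tuple
--
-- def _format_score_breakdown(score_breakdown: Dict) -> str:
--     if not isinstance(score_breakdown, dict) or not score_breakdown:
--         return "none"
--     ordered = [
--         "redScore",
--         "redDestroyScore",
--         "redCost",
--         "blueScore",
--         "blueDestroyScore",
--         "blueCost",
--     ]
--     parts = []
--     seen = set()
--     for key in ordered:
--         if key in score_breakdown:
--             parts.append(f"{key}={score_breakdown[key]}")
--             seen.add(key)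
--     for key in sorted(score_breakdown.keys()):
--         if key not in seen:
--             parts.append(f"{key}={score_breakdown[key]}")
--     return ", ".join(parts) if parts else "none"
-- ===== SOURCE B (Python) =====
-- def _format_score_breakdown(score_breakdown):
--     if not isinstance(score_breakdown, dict) or not score_breakdown:
--         return "none"
--     ordered = [
--         "redScore",
--         "redDestroyScore",
--         "redCost",
--         "blueScore",
--         "blueDestroyScore",
--         "blueCost",
--     ]
--     pos = {key: i for i, key in enumerate(ordered)}
--     keys = sorted(score_breakdown, key=lambda k: (pos.get(k, len(ordered)), k))
--     return ", ".join(f"{k}={score_breakdown[k]}" for k in keys)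
-- ===== Notes on version B (the rewrite author's own statement) =====
-- stated objective: simpler
-- what changed: A's two sequential emit loops (fixed-order pass with a `seen` set, then an alphabetical pass over the remaining keys) are replaced by one sorted() under a composite key (position-in-fixed-list from a precomputed index dict, then the key itself) followed by a single join pass.
import Mathlib
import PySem

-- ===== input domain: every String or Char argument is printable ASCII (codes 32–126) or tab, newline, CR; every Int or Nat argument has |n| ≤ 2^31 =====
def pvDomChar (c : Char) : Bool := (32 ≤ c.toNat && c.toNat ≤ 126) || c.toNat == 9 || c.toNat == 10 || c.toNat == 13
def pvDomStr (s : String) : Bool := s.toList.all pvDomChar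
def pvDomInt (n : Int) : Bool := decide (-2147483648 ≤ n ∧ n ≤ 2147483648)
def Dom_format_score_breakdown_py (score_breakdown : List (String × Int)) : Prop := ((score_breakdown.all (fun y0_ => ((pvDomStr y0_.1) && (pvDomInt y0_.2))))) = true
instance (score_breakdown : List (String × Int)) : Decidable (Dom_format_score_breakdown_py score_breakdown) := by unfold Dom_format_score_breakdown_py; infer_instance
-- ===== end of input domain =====

-- B replaces A's two emit loops + `seen` set by ONE stable sort under the composite key
-- (position-in-fixed-list, key) read off a precomputed index dict, then a single emit pass (objective: simpler).

-- shared helper: the f-string f"{key}={score_breakdown[key]}" (both sources format entries identically;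
-- dict indexing is exact via getD because every key formatted is present in the dict)
def pvEntry (d : PySem.Dict String Int) (k : String) : String :=
  k ++ "=" ++ PySem.Int.toStr (d.getD k 0)

-- ===== PORT A =====
-- A's literal `ordered` list
def pvOrderedA : List String :=
  ["redScore", "redDestroyScore", "redCost", "blueScore", "blueDestroyScore", "blueCost"]

-- the `isinstance` guard is always true under the type convention; `not score_breakdown` is size = 0
def format_score_breakdown_py (score_breakdown : List (String × Int)) : String :=
  let d := PySem.Dict.ofList score_breakdown
  if d.size = 0 then "none"
  else
    -- first loop: parts/seen over the fixed `ordered` list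
    let s1 := pvOrderedA.foldl
      (fun (acc : List String × PySem.Set String) key =>
        if d.contains key then (acc.1 ++ [pvEntry d key], acc.2.add key) else acc)
      ([], PySem.Set.empty)
    -- second loop: sorted remaining keys
    let parts := (PySem.List.sorted d.keys (fun k => k)).foldl
      (fun (acc : List String) key =>
        if s1.2.contains key then acc else acc ++ [pvEntry d key])
      s1.1
    if parts = [] then "none" else PySem.Str.join ", " parts

-- ===== PORT B =====
def pvOrderedB : List String :=
  ["redScore", "redDestroyScore", "redCost", "blueScore", "blueDestroyScore", "blueCost"]

-- pos = {key: i for i, key in enumerate(ordered)}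
def pvPosB : PySem.Dict String Int :=
  PySem.Dict.ofList ((PySem.List.enumerate pvOrderedB).map (fun p => (p.2, p.1)))

-- the composite sort key (pos.get(k, len(ordered)), k); Python tuple order = lexicographic
def pvRankB (k : String) : Lex (Int × String) :=
  toLex (pvPosB.getD k (pvOrderedB.length : Int), k)

def format_score_breakdown_py_alt (score_breakdown : List (String × Int)) : String :=
  let d := PySem.Dict.ofList score_breakdown
  if d.size = 0 then "none"
  else
    PySem.Str.join ", " ((PySem.List.sorted d.keys pvRankB).map (fun k => pvEntry d k))

-- ===== PRECONDITION & SPEC =====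
def Spec_format_score_breakdown_py (score_breakdown : List (String × Int)) (out : String) : Prop := out = format_score_breakdown_py_alt score_breakdown
instance (score_breakdown : List (String × Int)) (out : String) : Decidable (Spec_format_score_breakdown_py score_breakdown out) := by unfold Spec_format_score_breakdown_py; infer_instance

-- ===== CLAIM (what is proved, stated in full; the proofs are below) =====
def Claim_equal_format_score_breakdown_py : Prop := ∀ (score_breakdown : List (String × Int)), Dom_format_score_breakdown_py score_breakdown → Spec_format_score_breakdown_py score_breakdown (format_score_breakdown_py score_breakdown)

-- ===== LEMMAS AND PROOFS =====

-- A's first loop, characterised: it appends the entries of the present ordered keys and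
-- records exactly those keys in `seen`.
theorem pv_loop1 (d : PySem.Dict String Int) (ord : List String)
    (acc : List String) (s : PySem.Set String) :
    ord.foldl
      (fun (acc : List String × PySem.Set String) key =>
        if d.contains key then (acc.1 ++ [pvEntry d key], acc.2.add key) else acc)
      (acc, s)
    = (acc ++ (ord.filter d.contains).map (pvEntry d),
       PySem.Set.update s (ord.filter d.contains)) := by
  induction ord generalizing acc s with
  | nil => simp [PySem.Set.update]
  | cons k t ih =>
    by_cases hk : d.contains k
    · simp [List.foldl_cons, hk, ih, PySem.Set.update]
    · simp [List.foldl_cons, hk, ih]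

-- pos.get(k, 6) = 6 for keys outside the fixed list
theorem pv_pos_not_mem (k : String) (h : k ∉ pvOrderedB) :
    pvPosB.getD k (pvOrderedB.length : Int) = 6 := by
  have hmk : pvPosB = PySem.Dict.mk
      [("redScore", 0), ("redDestroyScore", 1), ("redCost", 2),
       ("blueScore", 3), ("blueDestroyScore", 4), ("blueCost", 5)] := by decide
  simp only [pvOrderedB, List.mem_cons, List.not_mem_nil, or_false, not_or] at h
  obtain ⟨h1, h2, h3, h4, h5, h6⟩ := h
  simp [hmk, PySem.Dict.getD_eq_get?_getD, PySem.Dict.get?,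
    Ne.symm h1, Ne.symm h2, Ne.symm h3, Ne.symm h4, Ne.symm h5, Ne.symm h6, pvOrderedB]

-- pos.get(k, 6) < 6 for keys inside the fixed list
theorem pv_pos_mem (k : String) (h : k ∈ pvOrderedB) :
    pvPosB.getD k (pvOrderedB.length : Int) < 6 := by
  simp only [pvOrderedB, List.mem_cons, List.not_mem_nil, or_false] at h
  rcases h with h | h | h | h | h | h <;> subst h <;> decide

-- the sorted order under pvRankB is: present ordered keys (in `ordered`'s order), then the
-- remaining keys alphabetically
theorem pv_sorted_rank (d : PySem.Dict String Int) (hnd : d.keys.Nodup) :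
    PySem.List.sorted d.keys pvRankB
    = pvOrderedA.filter d.contains
      ++ (PySem.List.sorted d.keys (fun k => k)).filter
           (fun k => !(decide (k ∈ pvOrderedA))) := by
  have hOO : pvOrderedB = pvOrderedA := rfl
  set p : String → Bool := fun k => decide (k ∈ pvOrderedA) with hp
  -- the candidate list
  set ys := pvOrderedA.filter d.contains
      ++ (PySem.List.sorted d.keys (fun k => k)).filter (fun k => !p k) with hys
  -- permutation
  have hperm1 : (pvOrderedA.filter d.contains).Perm (d.keys.filter p) := by
    rw [List.perm_ext_iff_of_nodup
      (List.Nodup.filter _ (by decide)) (List.Nodup.filter _ hnd)]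
    intro a
    simp [hp, PySem.Dict.contains_iff_mem_keys, and_comm]
  have hperm2 : ((PySem.List.sorted d.keys (fun k => k)).filter (fun k => !p k)).Perm
      (d.keys.filter (fun k => !p k)) :=
    (PySem.List.sorted_perm d.keys (fun k => k) false).filter _
  have hperm : ys.Perm d.keys :=
    (hperm1.append hperm2).trans (List.filter_append_perm p d.keys)
  -- pairwise strictly increasing under pvRankB
  have hpair : ys.Pairwise (fun a b => pvRankB a < pvRankB b) := by
    rw [hys, List.pairwise_append]
    refine ⟨?_, ?_, ?_⟩
    · exact List.Pairwise.sublist (List.filter_sublist)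
        (show pvOrderedA.Pairwise (fun a b => pvRankB a < pvRankB b) by decide)
    · have hnds : (PySem.List.sorted d.keys (fun k => k)).Nodup :=
        ((PySem.List.sorted_perm d.keys (fun k => k) false).nodup_iff).mpr hnd
      have hlt : (PySem.List.sorted d.keys (fun k => k)).Pairwise (fun a b => a < b) :=
        ((PySem.List.sorted_pairwise d.keys (fun k => k)).and hnds).imp
          (fun h => lt_of_le_of_ne h.1 h.2)
      refine (hlt.filter _).imp_of_mem ?_
      intro a b ha hb hab
      have ha' : a ∉ pvOrderedB := by
        rw [hOO]; simpa [hp] using (List.of_mem_filter ha)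
      have hb' : b ∉ pvOrderedB := by
        rw [hOO]; simpa [hp] using (List.of_mem_filter hb)
      simp only [pvRankB, Prod.Lex.toLex_lt_toLex, pv_pos_not_mem a ha', pv_pos_not_mem b hb']
      exact Or.inr ⟨trivial, hab⟩
    · intro a ha b hb
      have ha' : a ∈ pvOrderedB := by rw [hOO]; exact List.mem_of_mem_filter ha
      have hb' : b ∉ pvOrderedB := by
        rw [hOO]; simpa [hp] using (List.of_mem_filter hb)
      simp only [pvRankB, Prod.Lex.toLex_lt_toLex, pv_pos_not_mem b hb']
      exact Or.inl (pv_pos_mem a ha')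
  exact PySem.List.sorted_eq_of_perm_of_pairwise_lt d.keys ys pvRankB hperm hpair

-- ===== VERDICT (by name: the statement is the Claim_ definition above) =====
theorem format_score_breakdown_py_spec : Claim_equal_format_score_breakdown_py := by
  intro l _dom
  unfold Spec_format_score_breakdown_py
  simp only [format_score_breakdown_py, format_score_breakdown_py_alt]
  set d := PySem.Dict.ofList l with hd
  by_cases hz : d.size = 0
  · simp [hz]
  · simp only [hz, if_false]
    have hnd : d.keys.Nodup := PySem.Dict.nodup_keys_ofList l
    have hsr := pv_sorted_rank d hnd
    rw [pv_loop1]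
    have hfun : (fun (acc : List String) key =>
        if (PySem.Set.update PySem.Set.empty (pvOrderedA.filter d.contains)).contains key
        then acc else acc ++ [pvEntry d key])
      = (fun (acc : List String) key =>
        if (!(PySem.Set.update PySem.Set.empty (pvOrderedA.filter d.contains)).contains key)
        then acc ++ [pvEntry d key] else acc) := by
      funext acc k
      cases hck : (PySem.Set.update PySem.Set.empty (pvOrderedA.filter d.contains)).contains k
        <;> simp
    rw [hfun, PySem.List.foldl_append_if]
    have hcg : (PySem.List.sorted d.keys (fun k => k)).filter
        (fun k => !(PySem.Set.update PySem.Set.empty (pvOrderedA.filter d.contains)).contains k)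
      = (PySem.List.sorted d.keys (fun k => k)).filter (fun k => !(decide (k ∈ pvOrderedA))) := by
      refine List.filter_congr ?_
      intro k hk
      have hk' : k ∈ d.keys := (PySem.List.mem_sorted d.keys (fun k => k) false k).mp hk
      have hc : d.contains k = true := (PySem.Dict.contains_iff_mem_keys d k).mpr hk'
      have hupd : PySem.Set.update PySem.Set.empty (pvOrderedA.filter d.contains)
          = PySem.Set.ofList (pvOrderedA.filter d.contains) :=
        (PySem.Set.ofList_eq_foldl _).symm
      rw [hupd]
      congr 1
      simp [PySem.Set.contains, PySem.Set.mem_ofList,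
        List.mem_filter, hc]
    rw [hcg]
    simp only [List.nil_append]
    rw [← List.map_append, ← hsr]
    have hne : ((PySem.List.sorted d.keys pvRankB).map (pvEntry d)) ≠ [] := by
      have hlen : (PySem.List.sorted d.keys pvRankB).length = d.keys.length :=
        (PySem.List.sorted_perm d.keys pvRankB false).length_eq
      have : d.keys.length ≠ 0 := by
        simpa [PySem.Dict.size, PySem.Dict.keys] using hz
      simp [← List.length_eq_zero_iff, hlen, this]
    rw [if_neg hne]
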